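-- pv_equiv track=rewrite | github.com/posl/comment_recommendation | script/mod_gen/5_time/zh/136_B/9.py | count_odd_digits
-- ===== SOURCE A (Python) =====
-- def count_odd_digits(n):
--     count = 0
--     for i in range(1,n+1):
--         if i < 10:
--             if i % 2 == 1:
--                 count += 1
--         elif i < 100:
--             if i % 10 % 2 == 1:
--                 count += 1
--             if i // 10 % 2 == 1:
--                 count += 1
--         elif i < 1000:
--             if i % 10 % 2 == 1:
--                 count += 1
--             if i // 10 % 10 % 2 == 1:
--                 count += 1
--             if i // 100 % 2 == 1:
--                 count += 1
--         elif i < 10000: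
--             if i % 10 % 2 == 1:
--                 count += 1
--             if i // 10 % 10 % 2 == 1:
--                 count += 1
--             if i // 100 % 10 % 2 == 1:
--                 count += 1
--             if i // 1000 % 2 == 1:
--                 count += 1
--         elif i < 100000:
--             if i % 10 % 2 == 1:
--                 count += 1
--             if i // 10 % 10 % 2 == 1:
--                 count += 1
--             if i // 100 % 10 % 2 == 1:
--                 count += 1
--             if i // 1000 % 10 % 2 == 1:
--                 count += 1
--             if i // 10000 % 2 == 1:
--                 count += 1
--         else:
--             if i % 10 % 2 == 1:
--                 count += 1
--             if i // 10 % 10 % 2 == 1: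
--                 count += 1
--             if i // 100 % 10 % 2 == 1:
--                 count += 1
--             if i // 1000 % 10 % 2 == 1:
--                 count += 1
--             if i // 10000 % 10 % 2 == 1:
--                 count += 1
--             if i // 100000 % 2 == 1:
--                 count += 1
--     return count
-- ===== SOURCE B (Python) =====
-- def count_odd_digits(n):
--     # Closed-form digit-position count (O(1) instead of A's O(n) loop).
--     # A tallies only the six lowest decimal digit positions of each i;
--     # this formula counts, for each of those positions, how many of 1..n
--     # carry an odd digit there.
--     if n <= 0:
--         return 0
--     total = 0
--     pw = 1
--     for _ in range(6):
--         cur = n // pw % 10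
--         total += n // pw // 10 * 5 * pw + cur // 2 * pw
--         if cur % 2 == 1:
--             total += n % pw + 1
--         pw *= 10
--     return total
-- ===== Notes on version B (the rewrite author's own statement) =====
-- stated objective: faster
-- what changed: Replaced A's per-integer loop over range(1,n+1) with a closed-form digit-position counting formula: for each of the six digit positions A inspects, count directly how many integers in 1..n carry an odd digit there.
import Mathlib
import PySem

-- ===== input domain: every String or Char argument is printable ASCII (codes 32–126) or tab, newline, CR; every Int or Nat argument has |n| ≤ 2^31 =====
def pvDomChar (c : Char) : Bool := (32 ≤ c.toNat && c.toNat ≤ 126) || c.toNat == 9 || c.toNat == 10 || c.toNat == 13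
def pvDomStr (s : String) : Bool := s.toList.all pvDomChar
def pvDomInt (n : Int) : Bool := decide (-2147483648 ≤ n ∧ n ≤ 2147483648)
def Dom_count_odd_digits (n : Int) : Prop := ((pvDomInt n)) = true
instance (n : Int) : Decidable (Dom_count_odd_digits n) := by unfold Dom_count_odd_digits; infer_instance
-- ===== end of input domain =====

-- B replaces A's O(n) loop with a closed-form digit-position count (A tallies only the six
-- lowest decimal digit positions of each i; B counts those positions directly). Objective: faster.

-- ===== PORT A =====
-- loop body of A: the nested if-chain updating `count` for one value of i
def pvStepA (count i : Int) : Int :=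
  if i < 10 then
    if PySem.Int.mod i 2 = 1 then count + 1 else count
  else if i < 100 then
    let c := if PySem.Int.mod (PySem.Int.mod i 10) 2 = 1 then count + 1 else count
    let c := if PySem.Int.mod (PySem.Int.floordiv i 10) 2 = 1 then c + 1 else c
    c
  else if i < 1000 then
    let c := if PySem.Int.mod (PySem.Int.mod i 10) 2 = 1 then count + 1 else count
    let c := if PySem.Int.mod (PySem.Int.mod (PySem.Int.floordiv i 10) 10) 2 = 1 then c + 1 else c
    let c := if PySem.Int.mod (PySem.Int.floordiv i 100) 2 = 1 then c + 1 else c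
    c
  else if i < 10000 then
    let c := if PySem.Int.mod (PySem.Int.mod i 10) 2 = 1 then count + 1 else count
    let c := if PySem.Int.mod (PySem.Int.mod (PySem.Int.floordiv i 10) 10) 2 = 1 then c + 1 else c
    let c := if PySem.Int.mod (PySem.Int.mod (PySem.Int.floordiv i 100) 10) 2 = 1 then c + 1 else c
    let c := if PySem.Int.mod (PySem.Int.floordiv i 1000) 2 = 1 then c + 1 else c
    c
  else if i < 100000 then
    let c := if PySem.Int.mod (PySem.Int.mod i 10) 2 = 1 then count + 1 else count
    let c := if PySem.Int.mod (PySem.Int.mod (PySem.Int.floordiv i 10) 10) 2 = 1 then c + 1 else c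
    let c := if PySem.Int.mod (PySem.Int.mod (PySem.Int.floordiv i 100) 10) 2 = 1 then c + 1 else c
    let c := if PySem.Int.mod (PySem.Int.mod (PySem.Int.floordiv i 1000) 10) 2 = 1 then c + 1 else c
    let c := if PySem.Int.mod (PySem.Int.floordiv i 10000) 2 = 1 then c + 1 else c
    c
  else
    let c := if PySem.Int.mod (PySem.Int.mod i 10) 2 = 1 then count + 1 else count
    let c := if PySem.Int.mod (PySem.Int.mod (PySem.Int.floordiv i 10) 10) 2 = 1 then c + 1 else c
    let c := if PySem.Int.mod (PySem.Int.mod (PySem.Int.floordiv i 100) 10) 2 = 1 then c + 1 else c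
    let c := if PySem.Int.mod (PySem.Int.mod (PySem.Int.floordiv i 1000) 10) 2 = 1 then c + 1 else c
    let c := if PySem.Int.mod (PySem.Int.mod (PySem.Int.floordiv i 10000) 10) 2 = 1 then c + 1 else c
    let c := if PySem.Int.mod (PySem.Int.floordiv i 100000) 2 = 1 then c + 1 else c
    c

def count_odd_digits (n : Int) : Int :=
  (PySem.List.pyRange 1 (n + 1) 1).foldl pvStepA 0

-- ===== PORT B =====
def count_odd_digits_alt (n : Int) : Int :=
  if n ≤ 0 then 0
  else
    let r := (PySem.List.pyRange 0 6 1).foldl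
      (fun (s : Int × Int) (_ : Int) =>
        let total := s.1
        let pw := s.2
        let cur := PySem.Int.mod (PySem.Int.floordiv n pw) 10
        let total := total + PySem.Int.floordiv (PySem.Int.floordiv n pw) 10 * 5 * pw
                           + PySem.Int.floordiv cur 2 * pw
        let total := if PySem.Int.mod cur 2 = 1 then total + PySem.Int.mod n pw + 1 else total
        (total, pw * 10))
      (0, 1)
    r.1

-- ===== PRECONDITION & SPEC =====
def Spec_count_odd_digits (n : Int) (out : Int) : Prop := out = count_odd_digits_alt n
instance (n : Int) (out : Int) : Decidable (Spec_count_odd_digits n out) := by unfold Spec_count_odd_digits; infer_instance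

-- ===== CLAIM (what is proved, stated in full; the proofs are below) =====
def Claim_equal_count_odd_digits : Prop := ∀ (n : Int), Dom_count_odd_digits n → Spec_count_odd_digits n (count_odd_digits n)

-- ===== LEMMAS AND PROOFS =====

-- the per-i contribution A makes: odd digits among the six lowest positions
def pvOdd6 (i : Int) : Int :=
  (if i % 10 % 2 = 1 then 1 else 0) + (if i / 10 % 10 % 2 = 1 then 1 else 0)
  + (if i / 100 % 10 % 2 = 1 then 1 else 0) + (if i / 1000 % 10 % 2 = 1 then 1 else 0)
  + (if i / 10000 % 10 % 2 = 1 then 1 else 0) + (if i / 100000 % 10 % 2 = 1 then 1 else 0)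

-- one position's closed-form term of B
def pvPos (pw n : Int) : Int :=
  n / pw / 10 * 5 * pw + n / pw % 10 / 2 * pw
  + (if n / pw % 10 % 2 = 1 then n % pw + 1 else 0)

set_option maxHeartbeats 1600000 in
theorem pvStepA_eq (c i : Int) (h : 1 ≤ i) : pvStepA c i = c + pvOdd6 i := by
  have h2 : ∀ a : Int, PySem.Int.mod a 2 = a % 2 :=
    fun a => PySem.Int.mod_eq_emod_of_pos (by norm_num)
  have h10 : ∀ a : Int, PySem.Int.mod a 10 = a % 10 :=
    fun a => PySem.Int.mod_eq_emod_of_pos (by norm_num)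
  have f10 : ∀ a : Int, PySem.Int.floordiv a 10 = a / 10 :=
    fun a => PySem.Int.floordiv_eq_ediv_of_pos (by norm_num)
  have f100 : ∀ a : Int, PySem.Int.floordiv a 100 = a / 100 :=
    fun a => PySem.Int.floordiv_eq_ediv_of_pos (by norm_num)
  have f1000 : ∀ a : Int, PySem.Int.floordiv a 1000 = a / 1000 :=
    fun a => PySem.Int.floordiv_eq_ediv_of_pos (by norm_num)
  have f10000 : ∀ a : Int, PySem.Int.floordiv a 10000 = a / 10000 :=
    fun a => PySem.Int.floordiv_eq_ediv_of_pos (by norm_num)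
  have f100000 : ∀ a : Int, PySem.Int.floordiv a 100000 = a / 100000 :=
    fun a => PySem.Int.floordiv_eq_ediv_of_pos (by norm_num)
  by_cases t1 : i < 10
  · rw [pvStepA, if_pos t1]
    simp only [pvOdd6, h2]
    split_ifs <;> omega
  by_cases t2 : i < 100
  · rw [pvStepA, if_neg t1, if_pos t2]
    simp only [pvOdd6, h2, h10, f10]
    split_ifs <;> omega
  by_cases t3 : i < 1000
  · rw [pvStepA, if_neg t1, if_neg t2, if_pos t3]
    simp only [pvOdd6, h2, h10, f10, f100]
    split_ifs <;> omega
  by_cases t4 : i < 10000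
  · rw [pvStepA, if_neg t1, if_neg t2, if_neg t3, if_pos t4]
    simp only [pvOdd6, h2, h10, f10, f100, f1000]
    split_ifs <;> omega
  by_cases t5 : i < 100000
  · rw [pvStepA, if_neg t1, if_neg t2, if_neg t3, if_neg t4, if_pos t5]
    simp only [pvOdd6, h2, h10, f10, f100, f1000, f10000]
    split_ifs <;> omega
  · rw [pvStepA, if_neg t1, if_neg t2, if_neg t3, if_neg t4, if_neg t5]
    simp only [pvOdd6, h2, h10, f10, f100, f1000, f10000, f100000]
    split_ifs <;> omega

theorem pvA_succ (n : Int) (h : 0 ≤ n) :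
    count_odd_digits (n + 1) = count_odd_digits n + pvOdd6 (n + 1) := by
  unfold count_odd_digits
  rw [show n + 1 + 1 = (n + 1) + 1 from rfl,
      PySem.List.pyRange_one_succ_right (by omega : (1 : Int) ≤ n + 1),
      List.foldl_append]
  simp only [List.foldl]
  rw [pvStepA_eq _ _ (by omega)]

theorem pvA_nonpos (n : Int) (h : n ≤ 0) : count_odd_digits n = 0 := by
  unfold count_odd_digits
  rw [PySem.List.pyRange_one_eq_nil (by omega : n + 1 ≤ 1)]
  rfl

theorem pvPos_succ (pw : Int) (hpw : pw = 1 ∨ pw = 10 ∨ pw = 100 ∨ pw = 1000 ∨ pw = 10000 ∨ pw = 100000)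
    (n : Int) (h : 0 ≤ n) :
    pvPos pw (n + 1) = pvPos pw n + (if (n + 1) / pw % 10 % 2 = 1 then 1 else 0) := by
  unfold pvPos
  rcases hpw with rfl | rfl | rfl | rfl | rfl | rfl <;> (split_ifs <;> omega)

def pvBsum (n : Int) : Int :=
  pvPos 1 n + pvPos 10 n + pvPos 100 n + pvPos 1000 n + pvPos 10000 n + pvPos 100000 n

theorem pvBsum_succ (n : Int) (h : 0 ≤ n) : pvBsum (n + 1) = pvBsum n + pvOdd6 (n + 1) := by
  unfold pvBsum
  rw [pvPos_succ 1 (by norm_num) n h, pvPos_succ 10 (by norm_num) n h,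
      pvPos_succ 100 (by norm_num) n h, pvPos_succ 1000 (by norm_num) n h,
      pvPos_succ 10000 (by norm_num) n h, pvPos_succ 100000 (by norm_num) n h]
  have e1 : (n + 1) / 1 = n + 1 := Int.ediv_one _
  unfold pvOdd6
  rw [e1]
  ring

theorem pvB_eq_Bsum (n : Int) (h : 0 < n) : count_odd_digits_alt n = pvBsum n := by
  have h2 : ∀ a : Int, PySem.Int.mod a 2 = a % 2 :=
    fun a => PySem.Int.mod_eq_emod_of_pos (by norm_num)
  have h10 : ∀ a : Int, PySem.Int.mod a 10 = a % 10 :=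
    fun a => PySem.Int.mod_eq_emod_of_pos (by norm_num)
  have hm : ∀ a b : Int, 0 < b → PySem.Int.mod a b = a % b :=
    fun a b hb => PySem.Int.mod_eq_emod_of_pos hb
  have hf : ∀ a b : Int, 0 < b → PySem.Int.floordiv a b = a / b :=
    fun a b hb => PySem.Int.floordiv_eq_ediv_of_pos hb
  unfold count_odd_digits_alt
  rw [if_neg (by omega)]
  have hr : PySem.List.pyRange 0 6 1 = [0, 1, 2, 3, 4, 5] := by decide
  rw [hr]
  simp only [List.foldl]
  simp only [hm _ _ (by norm_num : (0:Int) < 1), hm _ _ (by norm_num : (0:Int) < 10),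
    hm _ _ (by norm_num : (0:Int) < 2),
    hf _ _ (by norm_num : (0:Int) < 1), hf _ _ (by norm_num : (0:Int) < 10),
    hf _ _ (by norm_num : (0:Int) < 2)]
  unfold pvBsum pvPos
  norm_num
  split_ifs <;> ring

theorem pvMain_nat (m : Nat) : count_odd_digits (m : Int) = pvBsum (m : Int) := by
  induction m with
  | zero =>
    have h0 : ((0 : Nat) : Int) = 0 := rfl
    rw [h0, pvA_nonpos 0 le_rfl]
    decide
  | succ k ih =>
    have : ((k + 1 : Nat) : Int) = (k : Int) + 1 := by push_cast; ring
    rw [this, pvA_succ _ (by positivity), pvBsum_succ _ (by positivity), ih]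

-- ===== VERDICT (by name: the statement is the Claim_ definition above) =====
theorem count_odd_digits_spec : Claim_equal_count_odd_digits := by
  intro n _
  unfold Spec_count_odd_digits
  by_cases h : n ≤ 0
  · rw [pvA_nonpos n h]
    unfold count_odd_digits_alt
    rw [if_pos h]
  · have h1 : 0 < n := by omega
    rw [pvB_eq_Bsum n h1]
    have := pvMain_nat n.toNat
    rwa [Int.toNat_of_nonneg (by omega)] at this
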